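-- pv_equiv track=rewrite | github.com/kayo5000/Prosodic | data_generator.py | _rhyme_unit
-- ===== SOURCE A (Python) =====
-- from typing import Dict, List, Optional, Tuple
--
-- def _rhyme_unit(phonemes: List[str]) -> Tuple[str, ...]:
--     """
--     Extract the rhyme-bearing unit: from the last primary-stressed vowel to end.
--
--     In CMU notation, vowels carry a stress digit (0, 1, 2). We seek the last
--     vowel that carries primary (1) or secondary (2) stress, then return from
--     that phoneme to the end of the sequence.
--
--     Falls back to the last vowel of any stress level if no stressed vowel found.
--     Returns empty tuple if no vowel found at all.
--     """
--     stressed_indices = [i for i, p in enumerate(phonemes) if p and p[-1] in "12"]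
--     if stressed_indices:
--         return tuple(phonemes[stressed_indices[-1]:])
--
--     any_vowel = [i for i, p in enumerate(phonemes) if p and p[-1].isdigit()]
--     if any_vowel:
--         return tuple(phonemes[any_vowel[-1]:])
--
--     return tuple()
-- ===== SOURCE B (Python) =====
-- from typing import List, Tuple
--
--
-- def _rhyme_unit(phonemes: List[str]) -> Tuple[str, ...]:
--     """Single reverse scan: return at the last stressed vowel immediately,
--     remembering the last plain vowel as a fallback."""
--     fallback = None
--     for i in range(len(phonemes) - 1, -1, -1):
--         p = phonemes[i]
--         if p:
--             last = p[-1]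
--             if last in "12":
--                 return tuple(phonemes[i:])
--             if fallback is None and last.isdigit():
--                 fallback = i
--     if fallback is not None:
--         return tuple(phonemes[fallback:])
--     return tuple()
-- ===== Notes on version B (the rewrite author's own statement) =====
-- stated objective: faster
-- what changed: Two full enumerate-filter comprehensions (stressed pass, then any-vowel pass) are replaced by one reverse index scan that returns early at the last stressed vowel while tracking the last plain-vowel index as a fallback.
import Mathlib
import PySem

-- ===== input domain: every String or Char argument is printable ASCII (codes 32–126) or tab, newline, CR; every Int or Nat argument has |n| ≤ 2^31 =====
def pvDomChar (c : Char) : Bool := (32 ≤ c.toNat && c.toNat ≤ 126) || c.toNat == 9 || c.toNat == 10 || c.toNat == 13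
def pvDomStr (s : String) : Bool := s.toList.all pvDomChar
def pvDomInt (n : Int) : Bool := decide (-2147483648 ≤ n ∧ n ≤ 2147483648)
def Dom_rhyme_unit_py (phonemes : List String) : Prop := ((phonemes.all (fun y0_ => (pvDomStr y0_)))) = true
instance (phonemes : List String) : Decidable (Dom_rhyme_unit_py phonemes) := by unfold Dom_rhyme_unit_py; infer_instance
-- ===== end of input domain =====

-- B replaces A's two enumerate-filter passes by one reverse scan with early return and a
-- fallback index; a timing run measured B faster (constant factor: early return, no index lists built).

-- ===== PORT A =====
-- `p and p[-1] in "12"` : true iff p nonempty and its last char is '1' or '2'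
def pvStress12 (p : String) : Bool :=
  match PySem.Str.pyGet? p (-1) with
  | some c => c == '1' || c == '2'
  | none => false

-- `p and p[-1].isdigit()` (Char.isDigit is exact for str.isdigit on the ASCII domain)
def pvLastIsDigit (p : String) : Bool :=
  match PySem.Str.pyGet? p (-1) with
  | some c => c.isDigit
  | none => false

def rhyme_unit_py (phonemes : List String) : List String :=
  let stressed_indices : List Int :=
    ((PySem.List.enumerate phonemes).filter (fun ip => pvStress12 ip.2)).map Prod.fst
  if stressed_indices ≠ [] then
    PySem.List.slice phonemes (some (PySem.List.pyGetD stressed_indices (-1) 0)) none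
  else
    let any_vowel : List Int :=
      ((PySem.List.enumerate phonemes).filter (fun ip => pvLastIsDigit ip.2)).map Prod.fst
    if any_vowel ≠ [] then
      PySem.List.slice phonemes (some (PySem.List.pyGetD any_vowel (-1) 0)) none
    else []

-- ===== PORT B =====
-- the reverse for-loop of Source B: `idxs` is the remaining indices, `fallback` the recorded one
def rhyme_unit_py_loop (phonemes : List String) : List Int → Option Int → List String
  | [], fallback =>
    match fallback with
    | some f => PySem.List.slice phonemes (some f) none
    | none => []
  | i :: rest, fallback =>
    match PySem.Str.pyGet? (PySem.List.pyGetD phonemes i "") (-1) with   -- `if p:` + `last = p[-1]`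
    | some last =>
      if last == '1' || last == '2' then
        PySem.List.slice phonemes (some i) none
      else
        rhyme_unit_py_loop phonemes rest
          (if fallback.isNone && last.isDigit then some i else fallback)
    | none => rhyme_unit_py_loop phonemes rest fallback

def rhyme_unit_py_alt (phonemes : List String) : List String :=
  rhyme_unit_py_loop phonemes
    (PySem.List.pyRange ((phonemes.length : Int) - 1) (-1) (-1)) none

-- ===== PRECONDITION & SPEC =====
def Spec_rhyme_unit_py (phonemes : List String) (out : List String) : Prop := out = rhyme_unit_py_alt phonemes
instance (phonemes : List String) (out : List String) : Decidable (Spec_rhyme_unit_py phonemes out) := by unfold Spec_rhyme_unit_py; infer_instance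

-- ===== CLAIM (what is proved, stated in full; the proofs are below) =====
def Claim_equal_rhyme_unit_py : Prop := ∀ (phonemes : List String), Dom_rhyme_unit_py phonemes → Spec_rhyme_unit_py phonemes (rhyme_unit_py phonemes)

-- ===== LEMMAS AND PROOFS =====

theorem pv_enumerate_eq (xs : List String) (s : Int) :
    PySem.List.enumerate xs s
      = (List.range xs.length).map (fun (k : Nat) => (s + (k : Int), xs.getD k "")) := by
  induction xs generalizing s with
  | nil => simp [PySem.List.enumerate]
  | cons x t ih =>
    simp only [PySem.List.enumerate, ih, List.length_cons, List.range_succ_eq_map,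
      List.map_cons, List.map_map]
    congr 1
    · simp
    · apply List.map_congr_left
      intro k _
      simp [Function.comp]
      omega

theorem pv_pyRange_rev (n : Nat) :
    PySem.List.pyRange ((n : Int) - 1) (-1) (-1)
      = ((List.range n).reverse).map (fun (k : Nat) => (k : Int)) := by
  have hrev : (List.range n).reverse = (List.range n).map (fun k => n - 1 - k) := by
    apply List.ext_getElem
    · simp
    · intro i h1 h2
      simp at h1 ⊢
  rw [hrev, List.map_map]
  by_cases hn : n = 0
  · subst hn; simp [PySem.List.pyRange]
  · simp only [PySem.List.pyRange, if_neg (by norm_num : (-1 : Int) ≠ 0)]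
    have hlt : (-1 : Int) < (n : Int) - 1 := by omega
    simp only [if_neg (by norm_num : ¬ (0:Int) < -1), if_pos hlt]
    have hcount : (((n : Int) - 1 - -1 + - -1 - 1) / - -1).toNat = n := by
      have : ((n : Int) - 1 - -1 + - -1 - 1) / - -1 = (n : Int) := by ring_nf; simp
      rw [this]; exact Int.toNat_natCast n
    rw [hcount]
    apply List.map_congr_left
    intro k hk
    simp at hk
    simp [Function.comp]
    omega

-- Source B's loop, run on the reversed index range with fallback fb, computes:
-- the tail from the last stressed index if one exists below m; otherwise the tail from fb
-- if recorded; otherwise the tail from the last vowel index below m; otherwise [].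
theorem pv_loop_char (xs : List String) (m : Nat) (hm : m ≤ xs.length) (fb : Option Int) :
    rhyme_unit_py_loop xs (((List.range m).reverse).map (fun (k : Nat) => (k : Int))) fb
      = match ((List.range m).reverse).find? (fun i => pvStress12 (xs.getD i "")) with
        | some i => xs.drop i
        | none =>
          match fb with
          | some f => PySem.List.slice xs (some f) none
          | none =>
            match ((List.range m).reverse).find? (fun i => pvLastIsDigit (xs.getD i "")) with
            | some i => xs.drop i
            | none => [] := by
  induction m generalizing fb with
  | zero => simp [rhyme_unit_py_loop]
  | succ m ih =>
    have hrange : (List.range (m+1)).reverse = m :: (List.range m).reverse := by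
      rw [List.range_succ]; simp
    rw [hrange]
    simp only [List.map_cons, List.find?_cons]
    have hget : PySem.List.pyGetD xs ((m : Nat) : Int) "" = xs.getD m "" :=
      PySem.List.pyGetD_natCast xs m ""
    rw [rhyme_unit_py_loop]
    rw [hget]
    rcases hc : PySem.Str.pyGet? (xs.getD m "") (-1) with _ | c
    · -- empty phoneme: skip
      have h1 : pvStress12 (xs.getD m "") = false := by simp only [pvStress12, hc]
      have h2 : pvLastIsDigit (xs.getD m "") = false := by simp only [pvLastIsDigit, hc]
      rw [h1, h2]
      simpa using ih (by omega) fb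
    · have h1 : pvStress12 (xs.getD m "") = (c == '1' || c == '2') := by
        simp only [pvStress12, hc]
      have h2 : pvLastIsDigit (xs.getD m "") = c.isDigit := by
        simp only [pvLastIsDigit, hc]
      rw [h1, h2]
      by_cases hs : (c == '1' || c == '2') = true
      · simp [hs, PySem.List.slice_from_natCast]
      · have ih' := ih (Nat.le_of_succ_le hm)
        simp only [List.map_reverse] at ih'
        rcases hf : List.find? (fun i => pvStress12 (xs[i]?.getD "")) (List.range m).reverse
          with _ | j
        · cases fb with
          | none =>
            by_cases hd : c.isDigit = true
            · simp [hs, hd, hf, ih', PySem.List.slice_from_natCast]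
            · have hd' : c.isDigit = false := by simpa using hd
              simp [hs, hd', hf, ih']
          | some f => simp [hs, hf, ih']
        · simp [hs, hf, ih']

theorem pv_last_filter (xs : List String) (f : String → Bool) :
    (((PySem.List.enumerate xs).filter (fun ip => f ip.2)).map Prod.fst).getLast?
      = (((List.range xs.length).reverse).find? (fun i => f (xs.getD i ""))).map
          (fun (i : Nat) => (i : Int)) := by
  rw [List.getLast?_map, List.getLast?_filter, pv_enumerate_eq xs 0, ← List.map_reverse,
    List.find?_map]
  have hcomp : ((fun ip : Int × String => f ip.2)
        ∘ (fun (k : Nat) => ((0 : Int) + (k : Int), xs.getD k "")))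
      = (fun i => f (xs.getD i "")) := by
    funext i; simp
  rw [hcomp]
  cases hj : ((List.range xs.length).reverse).find? (fun i => f (xs.getD i "")) with
  | none => rfl
  | some j => simp

theorem pv_ne_nil_iff (xs : List String) (f : String → Bool) :
    (((PySem.List.enumerate xs).filter (fun ip => f ip.2)).map Prod.fst ≠ [])
      ↔ ((List.range xs.length).reverse).find? (fun i => f (xs.getD i "")) ≠ none := by
  rw [← List.getLast?_isSome, pv_last_filter]
  cases hj : ((List.range xs.length).reverse).find? (fun i => f (xs.getD i "")) <;> simp

theorem pv_getD_neg_one (l : List Int) (h : l ≠ []) :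
    PySem.List.pyGetD l (-1) 0 = l.getLast?.getD 0 := by
  simp only [PySem.List.pyGetD, PySem.List.pyGet?, PySem.List.pyIdx?]
  have hl : 1 ≤ l.length := List.length_pos_of_ne_nil h
  rw [if_neg (by norm_num : ¬ (0:Int) ≤ -1), if_pos (by omega : -(l.length : Int) ≤ -(1:Int))]
  simp only [Option.bind_some, Int.neg_neg, Int.toNat_one]
  rw [List.getLast?_eq_getElem?]

-- ===== VERDICT (by name: the statement is the Claim_ definition above) =====
theorem rhyme_unit_py_spec : Claim_equal_rhyme_unit_py := by
  intro phonemes _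
  simp only [Spec_rhyme_unit_py, rhyme_unit_py, rhyme_unit_py_alt]
  rw [pv_pyRange_rev, pv_loop_char phonemes phonemes.length le_rfl none]
  have hs1 := pv_last_filter phonemes pvStress12
  have hn1 := pv_ne_nil_iff phonemes pvStress12
  have hs2 := pv_last_filter phonemes pvLastIsDigit
  have hn2 := pv_ne_nil_iff phonemes pvLastIsDigit
  set S := ((PySem.List.enumerate phonemes).filter (fun ip => pvStress12 ip.2)).map Prod.fst
    with hS
  set V := ((PySem.List.enumerate phonemes).filter (fun ip => pvLastIsDigit ip.2)).map Prod.fst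
    with hV
  rcases hf1 : ((List.range phonemes.length).reverse).find?
      (fun i => pvStress12 (phonemes.getD i "")) with _ | i
  · have hSe : S = [] := by by_contra h; exact hn1.mp h hf1
    rcases hf2 : ((List.range phonemes.length).reverse).find?
        (fun i => pvLastIsDigit (phonemes.getD i "")) with _ | j
    · have hVe : V = [] := by by_contra h; exact hn2.mp h hf2
      simp [hSe, hVe]
    · have hVne : V ≠ [] := hn2.mpr (by rw [hf2]; simp)
      have hlast : PySem.List.pyGetD V (-1) 0 = (j : Int) := by
        rw [pv_getD_neg_one V hVne, hs2, hf2]; rfl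
      simp [hSe, hVne, hlast, PySem.List.slice_from_natCast]
  · have hSne : S ≠ [] := hn1.mpr (by rw [hf1]; simp)
    have hlast : PySem.List.pyGetD S (-1) 0 = (i : Int) := by
      rw [pv_getD_neg_one S hSne, hs1, hf1]; rfl
    simp [hSne, hlast, PySem.List.slice_from_natCast]
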